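-- pv_equiv track=rewrite | github.com/AlexChen31337/terse | skills/skill-bridge/scripts/bridge.py | _split_toml_array
-- ===== SOURCE A (Python) =====
-- def _split_toml_array(s: str) -> list[str]:
--     """Split a comma-separated TOML array body, respecting nested brackets/quotes."""
--     parts = []
--     depth = 0
--     in_str = False
--     buf = ""
--     for ch in s:
--         if ch == '"' and not in_str:
--             in_str = True
--             buf += ch
--         elif ch == '"' and in_str:
--             in_str = False
--             buf += ch
--         elif ch in "[{(" and not in_str:
--             depth += 1
--             buf += ch
--         elif ch in "]}" and not in_str:
--             depth -= 1
--             buf += ch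
--         elif ch == "," and depth == 0 and not in_str:
--             parts.append(buf.strip())
--             buf = ""
--         else:
--             buf += ch
--     if buf.strip():
--         parts.append(buf.strip())
--     return parts
-- ===== SOURCE B (Python) =====
-- def _split_toml_array(s: str) -> list[str]:
--     """Split a comma-separated TOML array body, respecting nested brackets/quotes."""
--     # One pass recording split positions: slice out raw segments between
--     # top-level commas, then strip them all and drop a trailing empty segment.
--     segs = []
--     start = 0
--     depth = 0
--     in_str = False
--     for i, ch in enumerate(s):
--         if ch == '"':
--             in_str = not in_str
--         elif in_str:
--             pass
--         elif ch in "[{(":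
--             depth += 1
--         elif ch in "]}":
--             depth -= 1
--         elif ch == "," and depth == 0:
--             segs.append(s[start:i])
--             start = i + 1
--     segs.append(s[start:])
--     parts = [seg.strip() for seg in segs]
--     if parts[-1] == "":
--         parts.pop()
--     return parts
-- ===== Notes on version B (the rewrite author's own statement) =====
-- stated objective: alternative
-- what changed: A accumulates a character buffer and strips/appends segments as it scans; B only records top-level comma positions while scanning, slices the raw segments out of the string, then strips them all at once and drops a trailing empty segment.
import Mathlib
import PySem

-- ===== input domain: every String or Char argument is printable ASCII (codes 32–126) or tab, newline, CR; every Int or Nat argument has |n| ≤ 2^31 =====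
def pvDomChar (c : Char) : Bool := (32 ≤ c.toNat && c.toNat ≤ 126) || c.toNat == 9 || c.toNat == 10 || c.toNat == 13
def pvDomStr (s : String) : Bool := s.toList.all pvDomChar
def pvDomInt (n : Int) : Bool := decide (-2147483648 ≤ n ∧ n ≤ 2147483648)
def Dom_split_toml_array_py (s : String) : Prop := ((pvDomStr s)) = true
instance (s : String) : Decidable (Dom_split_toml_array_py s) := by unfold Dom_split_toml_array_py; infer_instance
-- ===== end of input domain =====

-- B replaces A's character-buffer accumulation by an index/slice decomposition:
-- the pass only records where the top-level commas are (slicing raw segments out of s),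
-- and all stripping plus the trailing-empty rule happen once at the end. Objective: alternative.

-- ===== PORT A =====
-- one iteration of A's for-loop; state = (parts, depth, in_str, buf)
def pvAStep (st : List (List Char) × Int × Bool × List Char) (ch : Char) :
    List (List Char) × Int × Bool × List Char :=
  match st with
  | (parts, depth, instr, buf) =>
    if ch = '"' ∧ instr = false then (parts, depth, true, buf ++ [ch])
    else if ch = '"' ∧ instr = true then (parts, depth, false, buf ++ [ch])
    else if (ch = '[' ∨ ch = '{' ∨ ch = '(') ∧ instr = false then (parts, depth + 1, instr, buf ++ [ch])
    else if (ch = ']' ∨ ch = '}') ∧ instr = false then (parts, depth - 1, instr, buf ++ [ch])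
    else if ch = ',' ∧ depth = 0 ∧ instr = false then (parts ++ [PySem.Chars.strip buf], depth, instr, [])
    else (parts, depth, instr, buf ++ [ch])

def split_toml_array_py (s : String) : List String :=
  let st := s.toList.foldl pvAStep ([], 0, false, [])
  let parts := st.1
  let buf := st.2.2.2
  let parts := if PySem.Chars.strip buf ≠ [] then parts ++ [PySem.Chars.strip buf] else parts
  parts.map String.ofList

-- ===== PORT B =====
-- one iteration of B's for-loop over enumerate(s); state = (segs, start, depth, in_str)
def pvBStep (cs : List Char) (st : List (List Char) × Int × Int × Bool) (p : Int × Char) :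
    List (List Char) × Int × Int × Bool :=
  match st, p with
  | (segs, start, depth, instr), (i, ch) =>
    if ch = '"' then (segs, start, depth, !instr)
    else if instr = true then (segs, start, depth, instr)
    else if ch = '[' ∨ ch = '{' ∨ ch = '(' then (segs, start, depth + 1, instr)
    else if ch = ']' ∨ ch = '}' then (segs, start, depth - 1, instr)
    else if ch = ',' ∧ depth = 0 then
      (segs ++ [PySem.List.slice cs (some start) (some i)], i + 1, depth, instr)
    else (segs, start, depth, instr)

def split_toml_array_py_alt (s : String) : List String :=
  let cs := s.toList
  let st := (PySem.List.enumerate cs 0).foldl (pvBStep cs) ([], 0, 0, false)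
  let segs := st.1 ++ [PySem.List.slice cs (some st.2.1) none]
  let parts := segs.map PySem.Chars.strip
  let parts := if parts.getLast? = some [] then parts.dropLast else parts
  parts.map String.ofList

-- ===== PRECONDITION & SPEC =====
def Spec_split_toml_array_py (s : String) (out : List String) : Prop := out = split_toml_array_py_alt s
instance (s : String) (out : List String) : Decidable (Spec_split_toml_array_py s out) := by unfold Spec_split_toml_array_py; infer_instance

-- ===== CLAIM (what is proved, stated in full; the proofs are below) =====
def Claim_equal_split_toml_array_py : Prop := ∀ (s : String), Dom_split_toml_array_py s → Spec_split_toml_array_py s (split_toml_array_py s)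

-- ===== LEMMAS AND PROOFS =====

-- abstraction: what A's state looks like in terms of B's state at end of input
def pvAbs (cs : List Char) (st : List (List Char) × Int × Int × Bool) :
    List (List Char) × Int × Bool × List Char :=
  match st with
  | (segs, start, depth, instr) =>
    (segs.map PySem.Chars.strip, depth, instr,
     (cs.drop start.toNat).take (cs.length - start.toNat))

lemma pv_loop (cs : List Char) (rest : List Char) :
    ∀ (segs : List (List Char)) (depth : Int) (instr : Bool) (n k : Nat),
    n ≤ k → rest = cs.drop k →
    rest.foldl pvAStep (segs.map PySem.Chars.strip, depth, instr,
        (cs.drop n).take (k - n)) =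
      pvAbs cs ((PySem.List.enumerate rest (k : Int)).foldl (pvBStep cs)
        (segs, (n : Int), depth, instr)) := by
  induction rest with
  | nil =>
    intro segs depth instr n k hn hrest
    have hlen : cs.length ≤ k := List.drop_eq_nil_iff.mp hrest.symm
    simp only [List.foldl_nil, PySem.List.enumerate_nil, pvAbs, Int.toNat_natCast]
    have h1 : (cs.drop n).take (k - n) = cs.drop n :=
      List.take_of_length_le (by simp; omega)
    have h2 : (cs.drop n).take (cs.length - n) = cs.drop n :=
      List.take_of_length_le (by simp)
    rw [h1, h2]
  | cons ch rest ih =>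
    intro segs depth instr n k hn hrest
    have hk : k < cs.length := by
      by_contra h
      have : cs.drop k = [] := List.drop_eq_nil_iff.mpr (by omega)
      rw [this] at hrest; exact List.cons_ne_nil _ _ hrest
    have hdk := List.drop_eq_getElem_cons hk
    rw [hdk] at hrest
    obtain ⟨ hch, hrest' ⟩ : ch = cs[k] ∧ rest = cs.drop (k + 1) := by
      injection hrest.symm with h1 h2; exact ⟨ h1.symm, h2.symm ⟩
    have hbuf : (cs.drop n).take (k - n) ++ [ch] = (cs.drop n).take (k + 1 - n) := by
      have hg : (cs.drop n)[k - n]'(by simp; omega) = cs[k] := by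
        simp; congr 1; omega
      have := List.take_append_getElem (l := cs.drop n) (i := k - n)
        (h := by simp; omega)
      rw [hg, ← hch] at this
      rw [this]; congr 1; omega
    rw [PySem.List.enumerate_cons]
    simp only [List.foldl_cons]
    by_cases hq : ch = '"'
    . cases instr with
      | false =>
        rw [show pvAStep (segs.map PySem.Chars.strip, depth, false,
              (cs.drop n).take (k - n)) ch
            = (segs.map PySem.Chars.strip, depth, true,
              (cs.drop n).take (k - n) ++ [ch]) by simp [pvAStep, hq]]
        rw [show pvBStep cs (segs, (n : Int), depth, false) ((k : Int), ch)
            = (segs, (n : Int), depth, true) by simp [pvBStep, hq]]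
        rw [hbuf, show ((k : Int) + 1) = ((k + 1 : Nat) : Int) by push_cast; ring]
        exact ih segs depth true n (k + 1) (by omega) hrest'
      | true =>
        rw [show pvAStep (segs.map PySem.Chars.strip, depth, true,
              (cs.drop n).take (k - n)) ch
            = (segs.map PySem.Chars.strip, depth, false,
              (cs.drop n).take (k - n) ++ [ch]) by simp [pvAStep, hq]]
        rw [show pvBStep cs (segs, (n : Int), depth, true) ((k : Int), ch)
            = (segs, (n : Int), depth, false) by simp [pvBStep, hq]]
        rw [hbuf, show ((k : Int) + 1) = ((k + 1 : Nat) : Int) by push_cast; ring]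
        exact ih segs depth false n (k + 1) (by omega) hrest'
    . cases instr with
      | true =>
        rw [show pvAStep (segs.map PySem.Chars.strip, depth, true,
              (cs.drop n).take (k - n)) ch
            = (segs.map PySem.Chars.strip, depth, true,
              (cs.drop n).take (k - n) ++ [ch]) by simp [pvAStep, hq]]
        rw [show pvBStep cs (segs, (n : Int), depth, true) ((k : Int), ch)
            = (segs, (n : Int), depth, true) by simp [pvBStep, hq]]
        rw [hbuf, show ((k : Int) + 1) = ((k + 1 : Nat) : Int) by push_cast; ring]
        exact ih segs depth true n (k + 1) (by omega) hrest'
      | false =>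
        by_cases hb : ch = '[' ∨ ch = '{' ∨ ch = '('
        . rw [show pvAStep (segs.map PySem.Chars.strip, depth, false,
                (cs.drop n).take (k - n)) ch
              = (segs.map PySem.Chars.strip, depth + 1, false,
                (cs.drop n).take (k - n) ++ [ch]) by
              rcases hb with h | h | h <;> simp [pvAStep, h]]
          rw [show pvBStep cs (segs, (n : Int), depth, false) ((k : Int), ch)
              = (segs, (n : Int), depth + 1, false) by
              rcases hb with h | h | h <;> simp [pvBStep, h]]
          rw [hbuf, show ((k : Int) + 1) = ((k + 1 : Nat) : Int) by push_cast; ring]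
          exact ih segs (depth + 1) false n (k + 1) (by omega) hrest'
        . by_cases hc : ch = ']' ∨ ch = '}'
          . rw [show pvAStep (segs.map PySem.Chars.strip, depth, false,
                  (cs.drop n).take (k - n)) ch
                = (segs.map PySem.Chars.strip, depth - 1, false,
                  (cs.drop n).take (k - n) ++ [ch]) by
                rcases hc with h | h <;> simp [pvAStep, h]]
            rw [show pvBStep cs (segs, (n : Int), depth, false) ((k : Int), ch)
                = (segs, (n : Int), depth - 1, false) by
                rcases hc with h | h <;> simp [pvBStep, h]]
            rw [hbuf, show ((k : Int) + 1) = ((k + 1 : Nat) : Int) by push_cast; ring]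
            exact ih segs (depth - 1) false n (k + 1) (by omega) hrest'
          . by_cases hm : ch = ',' ∧ depth = 0
            . obtain ⟨ hm1, hm2 ⟩ := hm
              rw [show pvAStep (segs.map PySem.Chars.strip, depth, false,
                    (cs.drop n).take (k - n)) ch
                  = (segs.map PySem.Chars.strip
                      ++ [PySem.Chars.strip ((cs.drop n).take (k - n))],
                     depth, false, []) by simp [pvAStep, hm1, hm2]]
              rw [show pvBStep cs (segs, (n : Int), depth, false) ((k : Int), ch)
                  = (segs ++ [PySem.List.slice cs (some (n : Int)) (some (k : Int))],
                     (k : Int) + 1, depth, false) by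
                    simp [pvBStep, hm1, hm2]]
              rw [show ((k : Int) + 1) = ((k + 1 : Nat) : Int) by push_cast; ring]
              have hseg : segs.map PySem.Chars.strip
                    ++ [PySem.Chars.strip ((cs.drop n).take (k - n))]
                  = (segs ++ [PySem.List.slice cs (some (n : Int)) (some (k : Int))]).map
                      PySem.Chars.strip := by
                simp [PySem.List.slice_natCast]
              rw [hseg,
                show ([] : List Char) = (cs.drop (k + 1)).take (k + 1 - (k + 1)) by simp]
              exact ih _ depth false (k + 1) (k + 1) (by omega) hrest'
            . rw [show pvAStep (segs.map PySem.Chars.strip, depth, false,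
                    (cs.drop n).take (k - n)) ch
                  = (segs.map PySem.Chars.strip, depth, false,
                    (cs.drop n).take (k - n) ++ [ch]) by
                  simp only [pvAStep]
                  rw [if_neg (by tauto), if_neg (by tauto), if_neg (by tauto),
                    if_neg (by tauto), if_neg (by tauto)]]
              rw [show pvBStep cs (segs, (n : Int), depth, false) ((k : Int), ch)
                  = (segs, (n : Int), depth, false) by
                  simp only [pvBStep]
                  rw [if_neg (by tauto), if_neg (by tauto), if_neg (by tauto),
                    if_neg (by tauto), if_neg (by tauto)]]
              rw [hbuf, show ((k : Int) + 1) = ((k + 1 : Nat) : Int) by push_cast; ring]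
              exact ih segs depth false n (k + 1) (by omega) hrest'

lemma pv_start_nonneg (cs : List Char) (ps : List (Int × Char)) :
    ∀ (st : List (List Char) × Int × Int × Bool), 0 ≤ st.2.1 → (∀ p ∈ ps, 0 ≤ p.1) →
    0 ≤ (ps.foldl (pvBStep cs) st).2.1 := by
  induction ps with
  | nil => intro st h _; simpa using h
  | cons p ps ih =>
    intro st h hmem
    rw [List.foldl_cons]
    refine ih _ ?_ (fun q hq => hmem q (List.mem_cons_of_mem _ hq))
    obtain ⟨segs, start, depth, instr⟩ := st
    obtain ⟨i, ch⟩ := p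
    have hi : (0:Int) ≤ i := hmem (i, ch) (List.mem_cons_self)
    simp only [pvBStep]
    split_ifs <;> simp at h ⊢ <;> omega

lemma pv_final (cs : List Char) (st : List (List Char) × Int × Int × Bool)
    (h0 : 0 ≤ st.2.1) :
    (if PySem.Chars.strip (pvAbs cs st).2.2.2 ≠ [] then
        (pvAbs cs st).1 ++ [PySem.Chars.strip (pvAbs cs st).2.2.2]
      else (pvAbs cs st).1).map String.ofList
    = (if ((st.1 ++ [PySem.List.slice cs (some st.2.1) none]).map
            PySem.Chars.strip).getLast? = some [] then
        ((st.1 ++ [PySem.List.slice cs (some st.2.1) none]).map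
            PySem.Chars.strip).dropLast
      else (st.1 ++ [PySem.List.slice cs (some st.2.1) none]).map
            PySem.Chars.strip).map String.ofList := by
  obtain ⟨segs, start, depth, instr⟩ := st
  simp only [pvAbs] at *
  have hslice : PySem.List.slice cs (some start) none
      = cs.drop start.toNat := PySem.List.slice_from _ (by simpa using h0)
  have hbuf : (cs.drop start.toNat).take (cs.length - start.toNat)
      = cs.drop start.toNat := List.take_of_length_le (by simp)
  rw [hbuf, hslice]
  by_cases he : PySem.Chars.strip (cs.drop start.toNat) = []
  · simp [he]
  · simp [he]

theorem split_toml_array_py_spec : Claim_equal_split_toml_array_py := by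
  intro s _
  unfold Spec_split_toml_array_py
  have h := pv_loop s.toList s.toList ([]) 0 false 0 0 (le_refl 0) (by simp)
  simp only [List.map_nil, Nat.sub_zero, List.drop_zero, Nat.cast_zero] at h
  rw [show (s.toList.take 0) = ([] : List Char) by simp] at h
  have h0 : 0 ≤ ((PySem.List.enumerate s.toList 0).foldl (pvBStep s.toList)
      ([], 0, 0, false)).2.1 := by
    refine pv_start_nonneg _ _ _ (by simp) ?_
    intro p hp
    obtain ⟨k, hk, rfl⟩ := (PySem.List.mem_enumerate_iff _ _ _).mp hp
    simp
  simp only [split_toml_array_py, split_toml_array_py_alt]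
  rw [h]
  exact pv_final s.toList _ h0
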